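-- pv_equiv track=rewrite | github.com/Carath/Advent-of-Code | 2021/AoC_2021_18_strings.py | findExplosion
-- ===== SOURCE A (Python) =====
-- def findExplosion(string):
-- 	count, start, end = 0, -1, -1
-- 	for i in range(len(string)):
-- 		if string[i] == '[':
-- 			count += 1
-- 			start = i
-- 		if string[i] == ']':
-- 			count -= 1
-- 			if count >= 4:
-- 				end = i + 1
-- 				break
-- 	return start, end
-- ===== SOURCE B (Python) =====
-- def findExplosion(string):
--     count = 0
--     end = -1
--     for i, c in enumerate(string):
--         if c == '[':
--             count += 1
--         elif c == ']':
--             count -= 1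
--             if count >= 4:
--                 end = i + 1
--                 break
--     bound = end if end != -1 else len(string)
--     return string.rfind('[', 0, bound), end
-- ===== Notes on version B (the rewrite author's own statement) =====
-- stated objective: simpler
-- what changed: The loop keeps only the nesting counter to locate the break position; the start index is no longer maintained as loop state but recovered afterwards with a single str.rfind call for the last opening bracket in the scanned prefix.
import Mathlib
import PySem

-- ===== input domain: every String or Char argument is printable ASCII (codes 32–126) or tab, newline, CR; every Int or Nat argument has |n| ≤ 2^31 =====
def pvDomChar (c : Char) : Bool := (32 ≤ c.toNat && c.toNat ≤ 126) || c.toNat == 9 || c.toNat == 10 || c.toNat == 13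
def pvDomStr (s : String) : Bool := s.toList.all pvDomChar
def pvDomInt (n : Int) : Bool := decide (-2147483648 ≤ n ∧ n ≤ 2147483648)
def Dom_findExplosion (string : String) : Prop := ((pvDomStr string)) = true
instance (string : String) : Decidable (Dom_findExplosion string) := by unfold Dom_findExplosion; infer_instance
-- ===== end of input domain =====

-- B replaces A's in-loop tracking of the last '[' index by a single rfind over the
-- scanned prefix after the loop; objective: simpler loop state. Proved equal on all inputs.

-- ===== PORT A =====
-- A's for-loop over range(len(string)) with state (count, start) and early break:
-- structural recursion over the character list with the running index i.
def findExplosion_loopA : List Char → Nat → Int → Int → Int × Int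
  | [], _, _, start => (start, -1)
  | c :: rest, i, count, start =>
    -- if string[i] == '[': count += 1; start = i
    let count1 := if c = '[' then count + 1 else count
    let start1 := if c = '[' then (i : Int) else start
    -- if string[i] == ']': count -= 1; if count >= 4: end = i+1; break
    if c = ']' then
      if count1 - 1 ≥ 4 then (start1, (i : Int) + 1)
      else findExplosion_loopA rest (i + 1) (count1 - 1) start1
    else findExplosion_loopA rest (i + 1) count1 start1

def findExplosion (string : String) : Int × Int :=
  findExplosion_loopA string.toList 0 0 (-1)

-- ===== PORT B =====
-- B's loop keeps only the counter and returns end (or -1); early break as in Source B.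
def findExplosion_loopB : List Char → Nat → Int → Int
  | [], _, _ => -1
  | c :: rest, i, count =>
    if c = '[' then findExplosion_loopB rest (i + 1) (count + 1)
    else if c = ']' then
      if count - 1 ≥ 4 then (i : Int) + 1
      else findExplosion_loopB rest (i + 1) (count - 1)
    else findExplosion_loopB rest (i + 1) count

def findExplosion_alt (string : String) : Int × Int :=
  let e := findExplosion_loopB string.toList 0 0
  let bound : Int := if e ≠ -1 then e else (string.toList.length : Int)
  (PySem.Str.rfindFrom string "[" 0 (some bound), e)

-- ===== PRECONDITION & SPEC =====
def Spec_findExplosion (string : String) (out : Int × Int) : Prop := out = findExplosion_alt string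
instance (string : String) (out : Int × Int) : Decidable (Spec_findExplosion string out) := by unfold Spec_findExplosion; infer_instance

-- ===== CLAIM (what is proved, stated in full; the proofs are below) =====
def Claim_equal_findExplosion : Prop := ∀ (string : String), Dom_findExplosion string → Spec_findExplosion string (findExplosion string)

-- ===== LEMMAS AND PROOFS =====

-- last index j < m with l[j] = '[', or -1 (downward recursion; proof-side only)
def lastOpenIn (l : List Char) : Nat → Int
  | 0 => -1
  | m + 1 => if l[m]? = some '[' then (m : Int) else lastOpenIn l m

-- number of characters A's/B's loop consumes before breaking (or the whole list)
def pvConsumed : List Char → Int → Nat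
  | [], _ => 0
  | c :: rest, count =>
    if c = '[' then pvConsumed rest (count + 1) + 1
    else if c = ']' then
      if count - 1 ≥ 4 then 1 else pvConsumed rest (count - 1) + 1
    else pvConsumed rest count + 1

theorem lastOpenIn_ge (l : List Char) (m : Nat) : -1 ≤ lastOpenIn l m := by
  induction m with
  | zero => simp [lastOpenIn]
  | succ m ih => simp only [lastOpenIn]; split <;> omega

theorem lastOpenIn_cons (c : Char) (rest : List Char) (m : Nat) :
    lastOpenIn (c :: rest) (m + 1) =
      if lastOpenIn rest m = -1 then (if c = '[' then 0 else -1)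
      else 1 + lastOpenIn rest m := by
  induction m with
  | zero => simp [lastOpenIn]
  | succ m ih =>
    have h := lastOpenIn_ge rest m
    simp only [lastOpenIn, List.getElem?_cons_succ] at *
    rcases h' : rest[m]? with _ | d
    · simp [h'] at ih ⊢; exact ih
    · by_cases hd : d = '[' <;> simp [h', hd] at ih ⊢ <;> [omega; exact ih]

theorem loopB_consumed (cs : List Char) : ∀ (i : Nat) (count : Int),
    (findExplosion_loopB cs i count = -1 ∧ pvConsumed cs count = cs.length) ∨
    (findExplosion_loopB cs i count = (i : Int) + pvConsumed cs count ∧ pvConsumed cs count ≤ cs.length) := by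
  induction cs with
  | nil => intro i count; left; simp [findExplosion_loopB, pvConsumed]
  | cons c rest ih =>
    intro i count
    by_cases h1 : c = '['
    · rcases ih (i + 1) (count + 1) with ⟨h, h'⟩ | ⟨h, h'⟩ <;>
        simp only [findExplosion_loopB, pvConsumed, h1, if_pos rfl, h, List.length_cons] <;>
        [left; right] <;> constructor <;> push_cast <;> omega
    · by_cases h2 : c = ']'
      · by_cases h3 : count - 1 ≥ 4
        · right
          simp only [findExplosion_loopB, pvConsumed, h1, h2, if_neg h1, if_pos rfl, if_pos h3,
            List.length_cons]
          constructor <;> push_cast <;> omega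
        · rcases ih (i + 1) (count - 1) with ⟨h, h'⟩ | ⟨h, h'⟩ <;>
            simp only [findExplosion_loopB, pvConsumed, h1, h2, if_neg h1, if_pos rfl, if_neg h3,
              h, List.length_cons] <;> [left; right] <;> constructor <;> push_cast <;> omega
      · rcases ih (i + 1) count with ⟨h, h'⟩ | ⟨h, h'⟩ <;>
          simp only [findExplosion_loopB, pvConsumed, h1, h2, if_neg h1, if_neg h2, h,
            List.length_cons] <;> [left; right] <;> constructor <;> push_cast <;> omega

theorem loopA_eq (cs : List Char) : ∀ (i : Nat) (count start : Int),
    findExplosion_loopA cs i count start =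
      ((if lastOpenIn cs (pvConsumed cs count) = -1 then start
        else (i : Int) + lastOpenIn cs (pvConsumed cs count)),
       findExplosion_loopB cs i count) := by
  induction cs with
  | nil => intro i count start; simp [findExplosion_loopA, findExplosion_loopB, pvConsumed, lastOpenIn]
  | cons c rest ih =>
    intro i count start
    by_cases h1 : c = '['
    · subst h1
      rw [show findExplosion_loopA ('['::rest) i count start
            = findExplosion_loopA rest (i+1) (count+1) (i:Int) from by
            simp [findExplosion_loopA]]
      rw [show findExplosion_loopB ('['::rest) i count
            = findExplosion_loopB rest (i+1) (count+1) from by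
            simp [findExplosion_loopB]]
      rw [show pvConsumed ('['::rest) count = pvConsumed rest (count+1) + 1 from by
            simp [pvConsumed]]
      rw [ih, lastOpenIn_cons]
      have hge := lastOpenIn_ge rest (pvConsumed rest (count+1))
      by_cases hY : lastOpenIn rest (pvConsumed rest (count+1)) = -1
      · simp [hY]
      · rw [if_neg hY, if_neg (by omega), if_neg hY]
        refine Prod.ext ?_ rfl
        push_cast; omega
    · by_cases h2 : c = ']'
      · subst h2
        rw [show pvConsumed (']'::rest) count
              = if count - 1 ≥ 4 then 1 else pvConsumed rest (count-1) + 1 from by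
              simp [pvConsumed]]
        have hcc : ¬ (']':Char) = '[' := by decide
        by_cases h3 : count - 1 ≥ 4
        · rw [if_pos h3]
          rw [show findExplosion_loopA (']'::rest) i count start = (start, (i:Int)+1) from by
                simp only [findExplosion_loopA, if_neg hcc,
                  if_pos (show (']':Char) = ']' from rfl), if_pos h3, if_true]]
          rw [show findExplosion_loopB (']'::rest) i count = (i:Int)+1 from by
                simp only [findExplosion_loopB, if_neg hcc, if_pos h3, if_true]]
          have hlo : lastOpenIn (']'::rest) 1 = -1 := rfl
          rw [hlo]; norm_num
        · rw [if_neg h3]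
          rw [show findExplosion_loopA (']'::rest) i count start
                = findExplosion_loopA rest (i+1) (count-1) start from by
                simp only [findExplosion_loopA, if_neg hcc, if_neg h3, if_true]]
          rw [show findExplosion_loopB (']'::rest) i count
                = findExplosion_loopB rest (i+1) (count-1) from by
                simp only [findExplosion_loopB, if_neg hcc, if_neg h3, if_true]]
          rw [ih, lastOpenIn_cons]
          have hge := lastOpenIn_ge rest (pvConsumed rest (count-1))
          by_cases hY : lastOpenIn rest (pvConsumed rest (count-1)) = -1
          · simp [hY]
          · rw [if_neg hY, if_neg (by omega), if_neg hY]
            refine Prod.ext ?_ rfl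
            push_cast; omega
      · rw [show pvConsumed (c::rest) count = pvConsumed rest count + 1 from by
              simp [pvConsumed, h1, h2]]
        rw [show findExplosion_loopA (c::rest) i count start
              = findExplosion_loopA rest (i+1) count start from by
              simp [findExplosion_loopA, h1, h2]]
        rw [show findExplosion_loopB (c::rest) i count
              = findExplosion_loopB rest (i+1) count from by
              simp [findExplosion_loopB, h1, h2]]
        rw [ih, lastOpenIn_cons]
        have hge := lastOpenIn_ge rest (pvConsumed rest count)
        by_cases hY : lastOpenIn rest (pvConsumed rest count) = -1
        · simp [hY, h1]
        · rw [if_neg hY, if_neg (by omega), if_neg hY]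
          refine Prod.ext ?_ rfl
          push_cast; omega

theorem isPrefixOf_open (ys : List Char) :
    List.isPrefixOf ['['] ys = true ↔ ys[0]? = some '[' := by
  cases ys with
  | nil => simp [List.isPrefixOf]
  | cons c rest =>
    rw [show List.isPrefixOf ['['] (c :: rest)
          = ((('[' : Char) == c) && List.isPrefixOf ([] : List Char) rest) from rfl,
        show List.isPrefixOf ([] : List Char) rest = true from rfl]
    simp only [Bool.and_true, beq_iff_eq, List.getElem?_cons_zero, Option.some.injEq]
    exact eq_comm

theorem rfind_go_eq (ys : List Char) : ∀ (k : Nat),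
    PySem.Chars.rfind.go ys ['['] k = lastOpenIn ys (k + 1) := by
  intro k
  induction k with
  | zero =>
    rw [show PySem.Chars.rfind.go ys ['['] 0 =
        (if List.isPrefixOf ['['] ys = true then 0 else -1) from rfl]
    simp only [lastOpenIn]
    by_cases h : ys[0]? = some '['
    · rw [if_pos ((isPrefixOf_open ys).mpr h), if_pos h]; norm_num
    · rw [if_neg (by rw [isPrefixOf_open]; exact h), if_neg h]
  | succ k ih =>
    rw [show PySem.Chars.rfind.go ys ['['] (k + 1) =
        (if List.isPrefixOf ['['] (ys.drop (k + 1)) = true then ((k + 1 : Nat) : Int)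
         else PySem.Chars.rfind.go ys ['['] k) from rfl]
    have hd : (ys.drop (k + 1))[0]? = ys[k + 1]? := by
      rw [List.getElem?_drop]
    show _ = lastOpenIn ys (k + 1 + 1)
    simp only [lastOpenIn]
    by_cases h : ys[k + 1]? = some '['
    · rw [if_pos (by rw [isPrefixOf_open, hd]; exact h), if_pos h]
    · rw [if_neg (by rw [isPrefixOf_open, hd]; exact h), if_neg h, ih]; rfl

theorem lastOpenIn_take (l : List Char) (m : Nat) : ∀ (k : Nat), k ≤ m →
    lastOpenIn (l.take m) k = lastOpenIn l k := by
  intro k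
  induction k with
  | zero => intro _; rfl
  | succ k ih =>
    intro hk
    have hkm : k < m := by omega
    have hget : (l.take m)[k]? = l[k]? := by
      rcases lt_or_ge k l.length with hlt | hge
      · rw [List.getElem?_take_of_lt hkm]
      · rw [List.getElem?_eq_none_iff.mpr (by simp; omega),
            List.getElem?_eq_none_iff.mpr (by omega)]
    simp [lastOpenIn, hget, ih (by omega)]

theorem rfind_eq_lastOpenIn (l : List Char) (m : Nat) (hm : m ≤ l.length) :
    PySem.Chars.rfind (l.take m) ['['] = lastOpenIn l m := by
  have hlen : (l.take m).length = m := by simp [hm]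
  rw [show PySem.Chars.rfind (l.take m) ['['] =
      PySem.Chars.rfind.go (l.take m) ['['] (l.take m).length from rfl,
    hlen, rfind_go_eq]
  have hnone : (l.take m)[m]? = none := by
    rw [List.getElem?_eq_none_iff]; omega
  simp only [lastOpenIn, hnone]
  simp only [reduceCtorEq, if_false]
  exact lastOpenIn_take l m m le_rfl

theorem rfindFrom_eval (s : String) (m : Nat) (hm : m ≤ s.toList.length) :
    PySem.Str.rfindFrom s "[" 0 (some (m : Int)) = lastOpenIn s.toList m := by
  have hr := rfind_eq_lastOpenIn s.toList m hm
  have hge := lastOpenIn_ge s.toList m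
  have hsub : "[".toList = ['['] := rfl
  have h1 : ¬ ((s.toList.length : Int) < (m : Int)) := by omega
  have h2 : ¬ ((m : Int) < 0) := by omega
  simp only [PySem.Str.rfindFrom, PySem.Chars.rfindFrom, hsub, if_neg h1, if_neg h2]
  norm_num
  rw [hr]
  split_ifs with h <;> omega

-- ===== VERDICT (by name: the statement is the Claim_ definition above) =====
theorem findExplosion_spec : Claim_equal_findExplosion := by
  intro s _
  unfold Spec_findExplosion
  have hA := loopA_eq s.toList 0 0 (-1)
  rcases loopB_consumed s.toList 0 0 with ⟨he, hc⟩ | ⟨he, hc⟩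
  · rw [show findExplosion s = (lastOpenIn s.toList s.toList.length, -1) from by
      unfold findExplosion; rw [hA, he, hc]; split_ifs with h <;> [rw [h]; norm_num]]
    rw [show findExplosion_alt s
          = (PySem.Str.rfindFrom s "[" 0 (some (s.toList.length : Int)), -1) from by
      simp only [findExplosion_alt, he]; norm_num]
    rw [rfindFrom_eval s s.toList.length le_rfl]
  · have hz : ((0:Nat):Int) + ((pvConsumed s.toList 0 : Nat):Int)
        = ((pvConsumed s.toList 0 : Nat):Int) := by push_cast; ring
    have hne : ((pvConsumed s.toList 0 : Nat):Int) ≠ -1 := by omega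
    rw [show findExplosion s
          = (lastOpenIn s.toList (pvConsumed s.toList 0), ((pvConsumed s.toList 0 : Nat):Int)) from by
      unfold findExplosion; rw [hA, he, hz]; split_ifs with h <;> [rw [h]; norm_num]]
    rw [show findExplosion_alt s
          = (PySem.Str.rfindFrom s "[" 0 (some ((pvConsumed s.toList 0 : Nat):Int)),
             ((pvConsumed s.toList 0 : Nat):Int)) from by
      simp only [findExplosion_alt, he, hz, ne_eq, hne, not_false_iff, if_pos]]
    rw [rfindFrom_eval s (pvConsumed s.toList 0) hc]
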